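-- pv_equiv track=rewrite | github.com/Tharungowda-123/agilPro | ml-service/app/ml/sprint_generator.py | _filter_by_priority
-- ===== SOURCE A (Python) =====
-- from typing import Dict, List, Any
--
-- def _filter_by_priority(stories: List[Dict]) -> List[Dict]:
--     """Filter and sort stories by priority."""
--     priority_order = {"critical": 4, "high": 3, "medium": 2, "low": 1}
--
--     filtered = [s for s in stories if s.get("status") in ["backlog", "ready", None]]
--
--     sorted_stories = sorted(
--         filtered,
--         key=lambda s: priority_order.get(s.get("priority", "medium").lower(), 2),
--         reverse=True,
--     )
--
--     return sorted_stories
-- ===== SOURCE B (Python) =====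
-- from typing import Dict, List, Any
--
-- def _filter_by_priority(stories: List[Dict]) -> List[Dict]:
--     """Single fused pass: filter by status and bucket by the lowered priority
--     string in one loop; concatenating the buckets in order 4,3,2,1 reproduces
--     the stable descending sort."""
--     b4, b3, b2, b1 = [], [], [], []
--     for s in stories:
--         status = s.get("status")
--         if status is None or status == "backlog" or status == "ready":
--             p = s.get("priority", "medium").lower()
--             if p == "critical":
--                 b4.append(s)
--             elif p == "high":
--                 b3.append(s)
--             elif p == "low":
--                 b1.append(s)
--             else:
--                 b2.append(s)
--     return b4 + b3 + b2 + b1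
-- ===== Notes on version B (the rewrite author's own statement) =====
-- stated objective: alternative
-- what changed: Replaces filter-then-comparison-sort (sorted with key dict lookup, reverse=True) by a single fused pass that both filters by status and dispatches each story into one of four priority buckets via a string if-chain, then concatenates the buckets in descending order; bucket insertion order reproduces the stability of Python's reverse sort. O(n) vs O(n log n), though not measurably faster at tested sizes.
import Mathlib
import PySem

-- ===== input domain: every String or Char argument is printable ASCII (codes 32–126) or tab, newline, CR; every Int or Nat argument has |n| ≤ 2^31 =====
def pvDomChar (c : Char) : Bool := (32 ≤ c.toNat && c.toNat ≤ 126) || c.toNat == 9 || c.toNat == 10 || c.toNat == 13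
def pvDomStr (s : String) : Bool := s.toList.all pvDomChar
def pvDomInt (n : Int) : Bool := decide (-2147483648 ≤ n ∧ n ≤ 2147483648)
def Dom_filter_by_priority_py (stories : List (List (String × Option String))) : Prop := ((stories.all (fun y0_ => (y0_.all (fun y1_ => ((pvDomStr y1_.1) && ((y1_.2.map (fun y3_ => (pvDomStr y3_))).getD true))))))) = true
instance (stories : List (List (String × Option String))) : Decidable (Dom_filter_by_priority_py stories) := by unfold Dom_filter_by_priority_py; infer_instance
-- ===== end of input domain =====

-- B fuses A's filter and comparison sort into one pass that buckets each kept story by a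
-- string if-chain on its lowered priority and concatenates the buckets (alternative decomposition).

-- ===== PORT A =====
-- priority_order = {"critical": 4, "high": 3, "medium": 2, "low": 1}
def pvPriorityOrder : PySem.Dict String Int := ⟨[("critical", 4), ("high", 3), ("medium", 2), ("low", 1)]⟩

-- s.get("status") — None both when the key is missing and when its value is None
def pvStatus (s : List (String × Option String)) : Option String := (PySem.Dict.get? ⟨s⟩ "status").join

-- s.get("status") in ["backlog", "ready", None]  (the filter comprehension's condition)
def pvKeep (s : List (String × Option String)) : Bool :=
  [some "backlog", some "ready", (none : Option String)].contains (pvStatus s)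

-- priority_order.get(s.get("priority", "medium").lower(), 2); a stored None priority (AttributeError in Python) is outside Pre_
def pvKey (s : List (String × Option String)) : Int :=
  PySem.Dict.getD pvPriorityOrder
    (PySem.Str.lower (((PySem.Dict.get? ⟨s⟩ "priority").getD (some "medium")).getD "medium")) 2

def filter_by_priority_py (stories : List (List (String × Option String))) : List (List (String × Option String)) :=
  let filtered := stories.filter pvKeep
  PySem.List.sorted filtered pvKey true

-- ===== PORT B =====
-- status = s.get("status"); status is None or status == "backlog" or status == "ready"
def bStatusOk (s : List (String × Option String)) : Bool :=
  match s.find? (fun p => p.1 == "status") with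
  | some (_, some v) => v == "backlog" || v == "ready"
  | _ => true

-- p = s.get("priority", "medium").lower()  (a stored None priority raises in Python B too: outside Pre_)
def bPrio (s : List (String × Option String)) : String :=
  PySem.Str.lower (match s.find? (fun p => p.1 == "priority") with
    | some (_, some v) => v
    | _ => "medium")

-- one iteration of B's fused loop over the quadruple of buckets (b4, b3, b2, b1)
def bStep (b : List (List (String × Option String)) × List (List (String × Option String)) × List (List (String × Option String)) × List (List (String × Option String))) (s : List (String × Option String)) : List (List (String × Option String)) × List (List (String × Option String)) × List (List (String × Option String)) × List (List (String × Option String)) :=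
  if bStatusOk s then
    let p := bPrio s
    if p == "critical" then (b.1 ++ [s], b.2.1, b.2.2.1, b.2.2.2)
    else if p == "high" then (b.1, b.2.1 ++ [s], b.2.2.1, b.2.2.2)
    else if p == "low" then (b.1, b.2.1, b.2.2.1, b.2.2.2 ++ [s])
    else (b.1, b.2.1, b.2.2.1 ++ [s], b.2.2.2)
  else b

def filter_by_priority_py_alt (stories : List (List (String × Option String))) : List (List (String × Option String)) :=
  let b := stories.foldl bStep ([], [], [], [])
  b.1 ++ b.2.1 ++ b.2.2.1 ++ b.2.2.2

-- ===== PRECONDITION & SPEC =====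
-- Pre_ excludes exactly the inputs where Python raises AttributeError: a story that passes the
-- status filter but stores None under "priority" (s.get("priority","medium") is then None and
-- None.lower() raises — in A and in B alike).
def Pre_filter_by_priority_py (stories : List (List (String × Option String))) : Prop :=
  ∀ s ∈ stories, pvKeep s = true → PySem.Dict.get? ⟨s⟩ "priority" ≠ some none
instance (stories : List (List (String × Option String))) : Decidable (Pre_filter_by_priority_py stories) := by unfold Pre_filter_by_priority_py; infer_instance

def pvWitness_filter_by_priority_py : (List (List (String × Option String))) :=
  [[("status", some "ready"), ("priority", some "HIGH")],
   [("title", some "a")],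
   [("status", some "done"), ("priority", none)]]

def Spec_filter_by_priority_py (stories : List (List (String × Option String))) (out : List (List (String × Option String))) : Prop := out = filter_by_priority_py_alt stories
instance (stories : List (List (String × Option String))) (out : List (List (String × Option String))) : Decidable (Spec_filter_by_priority_py stories out) := by unfold Spec_filter_by_priority_py; infer_instance

-- ===== CLAIM (what is proved, stated in full; the proofs are below) =====
def Claim_equal_filter_by_priority_py : Prop := ∀ (stories : List (List (String × Option String))), Dom_filter_by_priority_py stories → Pre_filter_by_priority_py stories → Spec_filter_by_priority_py stories (filter_by_priority_py stories)

-- ===== LEMMAS AND PROOFS =====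

-- B's status check agrees with A's filter condition
theorem bStatusOk_eq (s : List (String × Option String)) : bStatusOk s = pvKeep s := by
  unfold bStatusOk pvKeep pvStatus PySem.Dict.get?
  cases h : s.find? (fun p => p.1 == "status") with
  | none => simp [h]
  | some p =>
    cases p with
    | mk k v =>
      cases v with
      | none => simp [h]
      | some v =>
        simp only [h, Option.map_some, Option.join, List.contains]
        cases hb : v == "backlog" <;> cases hr : v == "ready" <;>
          simp_all [BEq.comm (a := v)] <;>
          exact ⟨fun hq => hb hq.symm, fun hq => hr hq.symm⟩

-- B's string if-chain agrees with A's dict lookup with default 2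
theorem chain_eq_getD (t : String) :
    (if t == "critical" then (4 : Int) else if t == "high" then 3 else if t == "low" then 1 else 2)
      = PySem.Dict.getD pvPriorityOrder t 2 := by
  simp only [pvPriorityOrder, PySem.Dict.getD, PySem.Dict.get?, List.find?]
  cases h1 : ("critical" == t) <;> cases h2 : ("high" == t) <;>
    cases h3 : ("medium" == t) <;> cases h4 : ("low" == t) <;>
      simp_all [BEq.comm (a := t)] <;> subst h3 <;> simp_all

-- B's lowered-priority string feeds A's key: pvKey via bPrio
theorem pvKey_eq_chain (s : List (String × Option String)) :
    pvKey s = (if bPrio s == "critical" then (4 : Int) else if bPrio s == "high" then 3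
               else if bPrio s == "low" then 1 else 2) := by
  rw [chain_eq_getD]
  unfold pvKey bPrio PySem.Dict.get?
  cases h : s.find? (fun p => p.1 == "priority") with
  | none => simp [h]
  | some p =>
    cases p with
    | mk k v => cases v <;> simp [h]

theorem insertBy_append_of_not {α : Type} (before : α → α → Bool) (x : α) (A B : List α)
    (h : ∀ y ∈ A, before x y = false) :
    PySem.List.insertBy before x (A ++ B) = A ++ PySem.List.insertBy before x B := by
  induction A with
  | nil => rfl
  | cons a t ih =>
    have ha : before x a = false := h a (by simp)
    simp [PySem.List.insertBy, ha, ih (fun y hy => h y (by simp [hy]))]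

theorem insertBy_cons_of_head {α : Type} (before : α → α → Bool) (x : α) (L : List α)
    (h : ∀ y ∈ L.head?, before x y = true) :
    PySem.List.insertBy before x L = x :: L := by
  cases L with
  | nil => rfl
  | cons a t => simp [PySem.List.insertBy, h a (by simp)]

-- a kept story's insertion into the concatenated buckets = B's dispatch step
theorem pv_step (b4 b3 b2 b1 : List (List (String × Option String)))
    (h4 : ∀ y ∈ b4, pvKey y = 4) (h3 : ∀ y ∈ b3, pvKey y = 3)
    (h2 : ∀ y ∈ b2, pvKey y = 2) (h1 : ∀ y ∈ b1, pvKey y = 1)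
    (x : List (String × Option String)) (hx : pvKeep x = true) :
    PySem.List.insertBy (fun a b => decide (pvKey b < pvKey a)) x (b4 ++ b3 ++ b2 ++ b1) =
      (bStep (b4, b3, b2, b1) x).1 ++ (bStep (b4, b3, b2, b1) x).2.1 ++
      (bStep (b4, b3, b2, b1) x).2.2.1 ++ (bStep (b4, b3, b2, b1) x).2.2.2 := by
  have hok : bStatusOk x = true := (bStatusOk_eq x).trans hx
  have hkey := pvKey_eq_chain x
  by_cases hc : bPrio x == "critical"
  · have hk : pvKey x = 4 := by rw [hkey, if_pos hc]
    rw [show b4 ++ b3 ++ b2 ++ b1 = b4 ++ (b3 ++ b2 ++ b1) by simp,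
        insertBy_append_of_not _ _ _ _ (by intro y hy; simp [hk, h4 y hy]),
        insertBy_cons_of_head _ _ _ (by
          intro y hy
          have hm : y ∈ b3 ++ b2 ++ b1 := List.mem_of_mem_head? hy
          simp only [List.mem_append] at hm
          rcases hm with (hm | hm) | hm
          · rw [hk, h3 y hm]; simp
          · rw [hk, h2 y hm]; simp
          · rw [hk, h1 y hm]; simp)]
    simp [bStep, hok, hc]
  · by_cases hh : bPrio x == "high"
    · have hk : pvKey x = 3 := by rw [hkey, if_neg hc, if_pos hh]
      rw [show b4 ++ b3 ++ b2 ++ b1 = (b4 ++ b3) ++ (b2 ++ b1) by simp,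
          insertBy_append_of_not _ _ _ _ (by
            intro y hy
            simp only [List.mem_append] at hy
            rcases hy with hy | hy
            · rw [hk]; simp [h4 y hy]
            · rw [hk]; simp [h3 y hy]),
          insertBy_cons_of_head _ _ _ (by
            intro y hy
            have hm : y ∈ b2 ++ b1 := List.mem_of_mem_head? hy
            simp only [List.mem_append] at hm
            rcases hm with hm | hm
            · rw [hk, h2 y hm]; simp
            · rw [hk, h1 y hm]; simp)]
      simp [bStep, hok, hc, hh]
    · by_cases hl : bPrio x == "low"
      · have hk : pvKey x = 1 := by rw [hkey, if_neg hc, if_neg hh, if_pos hl]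
        rw [show b4 ++ b3 ++ b2 ++ b1 = (b4 ++ b3 ++ b2 ++ b1) ++ [] by simp,
            insertBy_append_of_not _ _ _ _ (by
              intro y hy
              simp only [List.mem_append] at hy
              rw [hk]
              rcases hy with ((hy | hy) | hy) | hy
              · rw [h4 y hy]; simp
              · rw [h3 y hy]; simp
              · rw [h2 y hy]; simp
              · rw [h1 y hy]; simp)]
        simp [bStep, hok, hc, hh, hl, PySem.List.insertBy]
      · have hk : pvKey x = 2 := by rw [hkey, if_neg hc, if_neg hh, if_neg hl]
        rw [show b4 ++ b3 ++ b2 ++ b1 = (b4 ++ b3 ++ b2) ++ b1 by simp,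
            insertBy_append_of_not _ _ _ _ (by
              intro y hy
              simp only [List.mem_append] at hy
              rcases hy with (hy | hy) | hy
              · rw [hk]; simp [h4 y hy]
              · rw [hk]; simp [h3 y hy]
              · rw [hk]; simp [h2 y hy]),
            insertBy_cons_of_head _ _ _ (by
              intro y hy
              have hm : y ∈ b1 := List.mem_of_mem_head? hy
              rw [hk, h1 y hm]; simp)]
        simp [bStep, hok, hc, hh, hl]

-- the loop invariant: A's insertion fold over the filtered list = B's fused filter-and-dispatch fold
theorem pv_fold (l : List (List (String × Option String)))
    (b4 b3 b2 b1 : List (List (String × Option String)))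
    (h4 : ∀ y ∈ b4, pvKey y = 4) (h3 : ∀ y ∈ b3, pvKey y = 3)
    (h2 : ∀ y ∈ b2, pvKey y = 2) (h1 : ∀ y ∈ b1, pvKey y = 1) :
    (l.filter pvKeep).foldl
        (fun acc x => PySem.List.insertBy (fun a b => decide (pvKey b < pvKey a)) x acc)
        (b4 ++ b3 ++ b2 ++ b1) =
      (l.foldl bStep (b4, b3, b2, b1)).1 ++ (l.foldl bStep (b4, b3, b2, b1)).2.1 ++
      (l.foldl bStep (b4, b3, b2, b1)).2.2.1 ++ (l.foldl bStep (b4, b3, b2, b1)).2.2.2 := by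
  induction l generalizing b4 b3 b2 b1 with
  | nil => simp
  | cons x t ih =>
    by_cases hx : pvKeep x = true
    · have hok : bStatusOk x = true := (bStatusOk_eq x).trans hx
      simp only [List.filter_cons, hx, if_pos, List.foldl_cons]
      rw [pv_step b4 b3 b2 b1 h4 h3 h2 h1 x hx]
      have hkey := pvKey_eq_chain x
      by_cases hc : bPrio x == "critical"
      · have hb : bStep (b4, b3, b2, b1) x = (b4 ++ [x], b3, b2, b1) := by
          simp [bStep, hok, hc]
        rw [hb]
        exact ih (b4 ++ [x]) b3 b2 b1
          (by intro y hy; rcases List.mem_append.1 hy with h | h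
              · exact h4 y h
              · simp at h; subst h; rw [hkey, if_pos hc]) h3 h2 h1
      · by_cases hh : bPrio x == "high"
        · have hb : bStep (b4, b3, b2, b1) x = (b4, b3 ++ [x], b2, b1) := by
            simp [bStep, hok, hc, hh]
          rw [hb]
          exact ih b4 (b3 ++ [x]) b2 b1 h4
            (by intro y hy; rcases List.mem_append.1 hy with h | h
                · exact h3 y h
                · simp at h; subst h; rw [hkey, if_neg hc, if_pos hh]) h2 h1
        · by_cases hl : bPrio x == "low"
          · have hb : bStep (b4, b3, b2, b1) x = (b4, b3, b2, b1 ++ [x]) := by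
              simp [bStep, hok, hc, hh, hl]
            rw [hb]
            exact ih b4 b3 b2 (b1 ++ [x]) h4 h3 h2
              (by intro y hy; rcases List.mem_append.1 hy with h | h
                  · exact h1 y h
                  · simp at h; subst h; rw [hkey, if_neg hc, if_neg hh, if_pos hl])
          · have hb : bStep (b4, b3, b2, b1) x = (b4, b3, b2 ++ [x], b1) := by
              simp [bStep, hok, hc, hh, hl]
            rw [hb]
            exact ih b4 b3 (b2 ++ [x]) b1 h4 h3
              (by intro y hy; rcases List.mem_append.1 hy with h | h
                  · exact h2 y h
                  · simp at h; subst h; rw [hkey, if_neg hc, if_neg hh, if_neg hl]) h1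
    · have hok : bStatusOk x = false := by
        rw [bStatusOk_eq x]; exact Bool.eq_false_iff.2 hx
      have hb : bStep (b4, b3, b2, b1) x = (b4, b3, b2, b1) := by simp [bStep, hok]
      simp only [List.filter_cons, hx, List.foldl_cons, Bool.false_eq_true,
        ite_false, hb]
      exact ih b4 b3 b2 b1 h4 h3 h2 h1

-- ===== VERDICT (by name: the statement is the Claim_ definition above) =====
theorem filter_by_priority_py_spec : Claim_equal_filter_by_priority_py := by
  intro stories _ _
  unfold Spec_filter_by_priority_py filter_by_priority_py filter_by_priority_py_alt
  rw [PySem.List.sorted_rev_eq_foldl_insertBy]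
  exact pv_fold _ [] [] [] [] (by simp) (by simp) (by simp) (by simp)
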